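-- pv_equiv track=rewrite | github.com/UlrichBerntien/Codewars-Katas | 6_kyu/Loneliest_character.py | loneliest
-- ===== SOURCE A (Python) =====
-- from typing import List
--
-- def loneliest(strng: str) -> List[str]:
--     """Returns the list of loneliest characters."""
--     chars = []
--     distances = []
--     count_spaces = 0
--     for c in strng:
--         if c.isspace():
--             count_spaces += 1
--         else:
--             if distances: distances[-1] += count_spaces
--             chars.append( c )
--             distances.append( count_spaces )
--             count_spaces = 0
--     max_distance = max( distances )
--     return [chars[it] for it in range(len(distances)) if distances[it] == max_distance]
-- ===== SOURCE B (Python) =====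
-- def loneliest(strng):
--     positions = [i for i, c in enumerate(strng) if not c.isspace()]
--     gaps = [positions[0]] + [q - p - 1 for p, q in zip(positions, positions[1:])]
--     dists = [a + b for a, b in zip(gaps, gaps[1:] + [0])]
--     best = max(dists)
--     return [strng[p] for p, d in zip(positions, dists) if d == best]
-- ===== Notes on version B (the rewrite author's own statement) =====
-- stated objective: alternative
-- what changed: A keeps a running space counter and retro-patches the previous character's distance inside one stateful loop; B first extracts the non-space positions, derives each distance arithmetically from consecutive index gaps (before-gap + after-gap, 0 after the last), then filters by the maximum.
import Mathlib
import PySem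

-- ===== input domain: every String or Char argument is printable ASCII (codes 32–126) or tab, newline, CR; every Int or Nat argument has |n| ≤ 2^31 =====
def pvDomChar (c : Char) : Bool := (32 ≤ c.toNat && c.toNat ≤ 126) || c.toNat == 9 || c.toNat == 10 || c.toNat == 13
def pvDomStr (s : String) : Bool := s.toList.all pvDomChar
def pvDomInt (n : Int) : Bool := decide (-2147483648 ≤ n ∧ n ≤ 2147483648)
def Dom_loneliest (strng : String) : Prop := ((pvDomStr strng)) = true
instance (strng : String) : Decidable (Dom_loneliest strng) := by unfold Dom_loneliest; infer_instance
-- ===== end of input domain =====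

-- B replaces A's stateful loop (running space counter, retro-patching the previous
-- distance) by gap arithmetic over the list of non-space positions.

-- ===== PORT A =====
-- 'if distances: distances[-1] += count' : add k to the last element (no-op on [])
def pvBumpLast (ds : List Int) (k : Int) : List Int :=
  match ds with
  | [] => []
  | [d] => [d + k]
  | d :: t => d :: pvBumpLast t k

-- body of A's for-loop, state = (chars, distances, count_spaces)
def pvStepA (st : List Char × List Int × Int) (c : Char) : List Char × List Int × Int :=
  if PySem.Chars.isspace c then (st.1, st.2.1, st.2.2 + 1)
  else (st.1 ++ [c], pvBumpLast st.2.1 st.2.2 ++ [st.2.2], 0)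

def loneliest (strng : String) : List String :=
  let st := strng.toList.foldl pvStepA ([], [], 0)
  match PySem.List.max? st.2.1 (fun x => x) with
  | none => []   -- Python's max([]) raises ValueError here; excluded by Pre_loneliest
  | some m =>
      (List.range st.2.1.length).filterMap
        (fun it => if st.2.1.getD it 0 == m then some (String.mk [st.1.getD it ' ']) else none)

-- ===== PORT B =====
def loneliest_alt (strng : String) : List String :=
  let cs := strng.toList
  let positions : List Int :=
    ((PySem.List.enumerate cs 0).filter (fun pc => !PySem.Chars.isspace pc.2)).map (fun pc => pc.1)
  match positions with
  | [] => []   -- Source B raises IndexError (positions[0]) here; excluded by Pre_loneliest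
  | p0 :: rest =>
    let gaps : List Int := p0 :: (positions.zip rest).map (fun pq => pq.2 - pq.1 - 1)
    let dists : List Int := (gaps.zip (gaps.tail ++ [0])).map (fun ab => ab.1 + ab.2)
    match PySem.List.max? dists (fun x => x) with
    | none => []
    | some best =>
        ((positions.zip dists).filter (fun pd => pd.2 == best)).map
          (fun pd => String.mk [((PySem.List.pyGet? cs pd.1).getD ' ')])  -- strng[p], p always in range

-- ===== PRECONDITION & SPEC =====
-- A raises ValueError (max of an empty sequence) exactly when the string has no non-space
-- character; those inputs are excluded (B raises IndexError there).
def Pre_loneliest (strng : String) : Prop :=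
  strng.toList.any (fun c => !PySem.Chars.isspace c) = true
instance (strng : String) : Decidable (Pre_loneliest strng) := by unfold Pre_loneliest; infer_instance
def pvWitness_loneliest : String := " a  b "
def Spec_loneliest (strng : String) (out : List String) : Prop := out = loneliest_alt strng
instance (strng : String) (out : List String) : Decidable (Spec_loneliest strng out) := by unfold Spec_loneliest; infer_instance

-- ===== CLAIM (what is proved, stated in full; the proofs are below) =====
def Claim_equal_loneliest : Prop := ∀ (strng : String), Dom_loneliest strng → Pre_loneliest strng → Spec_loneliest strng (loneliest strng)

-- ===== LEMMAS AND PROOFS =====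

-- chars with a non-space test
def pvHasNS (cs : List Char) : Bool := cs.any (fun c => !PySem.Chars.isspace c)

def pvCharsOf (cs : List Char) : List Char := cs.filter (fun c => !PySem.Chars.isspace c)

-- number of leading spaces
def pvLeadGap : List Char → Int
  | [] => 0
  | c :: t => if PySem.Chars.isspace c then 1 + pvLeadGap t else 0

-- final value of A's count_spaces
def pvTailCnt : List Char → Int → Int
  | [], cnt => cnt
  | c :: t, cnt => if PySem.Chars.isspace c then pvTailCnt t (cnt + 1) else pvTailCnt t 0

-- final value of each distance: own leading count plus gap to the next non-space (0 if none)
def pvDists : List Char → Int → List Int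
  | [], _ => []
  | c :: t, cnt =>
      if PySem.Chars.isspace c then pvDists t (cnt + 1)
      else (if pvHasNS t then cnt + pvLeadGap t else cnt) :: pvDists t 0

-- positions of the non-space characters, starting index i
def pvPos : Int → List Char → List Int
  | _, [] => []
  | i, c :: t => if PySem.Chars.isspace c then pvPos (i + 1) t else i :: pvPos (i + 1) t

-- B's gap arithmetic, recursively: g is the before-gap of the head position
def pvBd : Int → List Int → List Int
  | _, [] => []
  | g, [_] => [g]
  | g, p :: q :: rest => (g + (q - p - 1)) :: pvBd (q - p - 1) (q :: rest)

theorem pvBumpLast_append (ds : List Int) (d k : Int) :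
    pvBumpLast (ds ++ [d]) k = ds ++ [d + k] := by
  induction ds with
  | nil => simp [pvBumpLast]
  | cons a t ih =>
    cases t with
    | nil => simp [pvBumpLast]
    | cons b u => simpa [pvBumpLast] using ih

theorem pvFoldA (cs : List Char) : ∀ (ch : List Char) (ds : List Int) (cnt : Int),
    List.foldl pvStepA (ch, ds, cnt) cs =
      (ch ++ pvCharsOf cs,
       (if pvHasNS cs then pvBumpLast ds (cnt + pvLeadGap cs) else ds) ++ pvDists cs cnt,
       pvTailCnt cs cnt) := by
  induction cs with
  | nil => intro ch ds cnt; simp [pvCharsOf, pvHasNS, pvDists, pvTailCnt]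
  | cons c t ih =>
    intro ch ds cnt
    by_cases h : PySem.Chars.isspace c = true
    · rw [List.foldl_cons, show pvStepA (ch, ds, cnt) c = (ch, ds, cnt + 1) by
        simp [pvStepA, h], ih]
      have hlg : cnt + pvLeadGap (c :: t) = (cnt + 1) + pvLeadGap t := by
        simp [pvLeadGap, h]; ring
      simp [pvCharsOf, pvHasNS, pvDists, pvTailCnt, h, hlg]
    · rw [List.foldl_cons, show pvStepA (ch, ds, cnt) c
          = (ch ++ [c], pvBumpLast ds cnt ++ [cnt], 0) by simp [pvStepA, h], ih]
      have hns : pvHasNS (c :: t) = true := by simp [pvHasNS, h]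
      have hlg : pvLeadGap (c :: t) = 0 := by simp [pvLeadGap, h]
      by_cases ht : pvHasNS t = true
      · simp [pvCharsOf, pvDists, pvTailCnt, h, hns, hlg, ht, pvBumpLast_append]
      · simp [pvCharsOf, pvDists, pvTailCnt, h, hns, hlg, ht]

theorem pvPos_enum (cs : List Char) : ∀ (i : Int),
    ((PySem.List.enumerate cs i).filter (fun pc => !PySem.Chars.isspace pc.2)).map
      (fun pc => pc.1) = pvPos i cs := by
  induction cs with
  | nil => intro i; simp [PySem.List.enumerate_nil, pvPos]
  | cons c t ih =>
    intro i
    by_cases h : PySem.Chars.isspace c = true <;>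
      simp [PySem.List.enumerate_cons, pvPos, h, List.filter_cons, ih]

theorem pvPos_nil (cs : List Char) : ∀ (i : Int), pvHasNS cs = false → pvPos i cs = [] := by
  induction cs with
  | nil => intro i _; simp [pvPos]
  | cons c t ih =>
    intro i h
    simp [pvHasNS] at h
    have ht : pvHasNS t = false := by simp [pvHasNS]; exact fun x hx => h.2 x hx
    simp [pvPos, h.1, ih (i + 1) ht]

theorem pvDists_nil (cs : List Char) : ∀ (cnt : Int), pvHasNS cs = false → pvDists cs cnt = [] := by
  induction cs with
  | nil => intro _ _; simp [pvDists]
  | cons c t ih =>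
    intro cnt h
    simp [pvHasNS] at h
    have ht : pvHasNS t = false := by simp [pvHasNS]; exact fun x hx => h.2 x hx
    simp [pvDists, h.1, ih (cnt + 1) ht]

theorem pvPos_cons (cs : List Char) : ∀ (i : Int), pvHasNS cs = true →
    ∃ rest, pvPos i cs = (i + pvLeadGap cs) :: rest := by
  induction cs with
  | nil => intro i h; simp [pvHasNS] at h
  | cons c t ih =>
    intro i h
    by_cases hc : PySem.Chars.isspace c = true
    · have ht : pvHasNS t = true := by simpa [pvHasNS, hc] using h
      rcases ih (i + 1) ht with ⟨rest, hr⟩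
      refine ⟨rest, ?_⟩
      simp [pvPos, pvLeadGap, hc, hr]
      ring_nf
    · exact ⟨pvPos (i + 1) t, by simp [pvPos, pvLeadGap, hc]⟩

theorem pvDists_eq_pvBd (cs : List Char) : ∀ (i cnt : Int), pvHasNS cs = true →
    pvDists cs cnt = pvBd (cnt + pvLeadGap cs) (pvPos i cs) := by
  induction cs with
  | nil => intro i cnt h; simp [pvHasNS] at h
  | cons c t ih =>
    intro i cnt h
    by_cases hc : PySem.Chars.isspace c = true
    · have ht : pvHasNS t = true := by simpa [pvHasNS, hc] using h
      have := ih (i + 1) (cnt + 1) ht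
      simp [pvDists, pvPos, pvLeadGap, hc, this]
      ring_nf
    · by_cases ht : pvHasNS t = true
      · rcases pvPos_cons t (i + 1) ht with ⟨rest, hr⟩
        have hih := ih (i + 1) 0 ht
        rw [hr] at hih
        simp only [pvDists, pvPos, pvLeadGap, hc, if_neg, Bool.not_eq_true, ht, if_pos,
          Bool.false_eq_true, hr]
        simp [pvBd, hih]
        constructor
        · ring
        · have e : i + 1 + pvLeadGap t - i - 1 = 0 + pvLeadGap t := by ring
          rw [e, zero_add]
      · have h1 := pvPos_nil t (i + 1) (by simpa using ht)
        have h2 := pvDists_nil t 0 (by simpa using ht)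
        simp [pvDists, pvPos, pvLeadGap, hc, ht, h1, h2, pvBd]

-- B's zip computation equals pvBd
theorem pvZipDists : ∀ (rest : List Int) (p g : Int),
    ((g :: ((p :: rest).zip rest).map (fun pq => pq.2 - pq.1 - 1)).zip
        (((g :: ((p :: rest).zip rest).map (fun pq => pq.2 - pq.1 - 1)).tail) ++ [0])).map
      (fun ab => ab.1 + ab.2) = pvBd g (p :: rest) := by
  intro rest
  induction rest with
  | nil => intro p g; simp [pvBd]
  | cons q r ih =>
    intro p g
    simp only [List.map_cons, List.zip_cons_cons, List.tail_cons, List.cons_append, pvBd]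
    exact congrArg _ (ih q (q - p - 1))

theorem pvBd_length : ∀ (P : List Int) (g : Int), (pvBd g P).length = P.length := by
  intro P
  induction P with
  | nil => intro g; simp [pvBd]
  | cons p rest ih =>
    intro g
    cases rest with
    | nil => simp [pvBd]
    | cons q r => simp [pvBd]; simpa using ih (q - p - 1)

-- the range/getD comprehension over two parallel lists as a zip-filter-map
theorem pvRangeFilter (m : Int) : ∀ (ys : List Int) (xs : List Char), xs.length = ys.length →
    (List.range ys.length).filterMap
        (fun it => if ys.getD it 0 == m then some (String.mk [xs.getD it ' ']) else none)
      = ((xs.zip ys).filter (fun p => p.2 == m)).map (fun p => String.mk [p.1]) := by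
  intro ys
  induction ys with
  | nil => intro xs h; simp
  | cons y yt ih =>
    intro xs h
    cases xs with
    | nil => simp at h
    | cons x xt =>
      simp only [List.length_cons, List.range_succ_eq_map, List.filterMap_cons,
        List.filterMap_map]
      have h' : xt.length = yt.length := by simpa using h
      have := ih xt h'
      by_cases hy : (y == m) = true <;>
        simp_all [List.filter_cons, Function.comp_def]


-- ===== VERDICT (by name: the statement is the Claim_ definition above) =====
-- the two final comprehensions agree, given the pair list behind positions/chars
theorem pvFinal (cs : List Char) (D : List Int) (m : Int)
    (pairs : List (Int × Char))
    (hsub : ∀ x ∈ pairs, x ∈ PySem.List.enumerate cs 0)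
    (hlen : pairs.length = D.length) :
    (List.range D.length).filterMap
        (fun it => if D.getD it 0 == m then
            some (String.mk [(pairs.map (fun pc => pc.2)).getD it ' ']) else none)
      = (((pairs.map (fun pc => pc.1)).zip D).filter (fun pd => pd.2 == m)).map
          (fun pd => String.mk [((PySem.List.pyGet? cs pd.1).getD ' ')]) := by
  have hlen' : (pairs.map (fun pc => pc.2)).length = D.length := by simpa using hlen
  rw [pvRangeFilter m D (pairs.map (fun pc => pc.2)) hlen']
  rw [List.zip_map_left, List.zip_map_left, List.filter_map, List.filter_map,
    List.map_map, List.map_map]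
  refine List.map_congr_left ?_
  intro x hx
  have hx1 : x.1 ∈ pairs := (List.of_mem_zip (List.mem_of_mem_filter hx)).1
  have hx2 := hsub _ hx1
  rw [PySem.List.mem_enumerate_iff] at hx2
  rcases hx2 with ⟨k, hk, hxk⟩
  simp [Function.comp_def, hxk, PySem.List.pyGet?_natCast, hk]

theorem pvMapSndFilter (l : List (Int × Char)) (q : Char → Bool) :
    (l.filter (fun pc => q pc.2)).map (fun pc => pc.2) = (l.map (fun pc => pc.2)).filter q := by
  induction l with
  | nil => simp
  | cons a t ih => by_cases hq : q a.2 = true <;> simp [List.filter_cons, hq, ih]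

theorem loneliest_spec : Claim_equal_loneliest := by
  intro strng _ hpre
  unfold Spec_loneliest loneliest loneliest_alt
  have hNS : pvHasNS strng.toList = true := hpre
  obtain ⟨rest, hrest⟩ := pvPos_cons strng.toList 0 hNS
  rw [pvFoldA strng.toList [] [] 0]
  have hbump : (if pvHasNS strng.toList then
      pvBumpLast [] (0 + pvLeadGap strng.toList) else []) = [] := by
    simp [pvBumpLast]
  simp only [hbump, List.nil_append]
  have hDA : pvDists strng.toList 0
      = pvBd (0 + pvLeadGap strng.toList) ((0 + pvLeadGap strng.toList) :: rest) := by
    rw [pvDists_eq_pvBd strng.toList 0 0 hNS, hrest]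
  rw [hDA, pvPos_enum strng.toList 0, hrest]
  simp only []
  rw [pvZipDists rest (0 + pvLeadGap strng.toList) (0 + pvLeadGap strng.toList)]
  rcases hmax : PySem.List.max? (pvBd (0 + pvLeadGap strng.toList)
      ((0 + pvLeadGap strng.toList) :: rest)) (fun x => x) with _ | m
  · exfalso
    rw [PySem.List.max?_eq_none_iff] at hmax
    have hl := pvBd_length ((0 + pvLeadGap strng.toList) :: rest) (0 + pvLeadGap strng.toList)
    rw [hmax] at hl
    simp at hl
  · set pairs := (PySem.List.enumerate strng.toList 0).filter
      (fun pc => !PySem.Chars.isspace pc.2) with hpairs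
    have hpairsC : pvCharsOf strng.toList = pairs.map (fun pc => pc.2) := by
      rw [hpairs, pvMapSndFilter (PySem.List.enumerate strng.toList 0) (fun c => !PySem.Chars.isspace c), PySem.List.map_snd_enumerate]
      rfl
    have hpairsP : ((0 + pvLeadGap strng.toList) :: rest : List Int)
        = pairs.map (fun pc => pc.1) := by
      rw [hpairs, pvPos_enum strng.toList 0, hrest]
    set D := pvBd (0 + pvLeadGap strng.toList) ((0 + pvLeadGap strng.toList) :: rest)
      with hD
    have hlen : pairs.length = D.length := by
      rw [hD, pvBd_length]
      simpa using (congrArg List.length hpairsP).symm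
    rw [hpairsC, hpairsP]
    exact pvFinal strng.toList D m pairs (fun x hx => List.mem_of_mem_filter hx) hlen
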